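-- pv_equiv track=rewrite | github.com/zuhoffff/PasswordHackerwithPython | Password Hacker with Python/task/hacking/hack.py | case_permutations
-- ===== SOURCE A (Python) =====
-- from itertools import product
--
-- def case_permutations(word):
--     lu_sequence = []
--     for char in word:
--         if char.isdigit():
--             lu_sequence.append(char)
--         else:
--             lu_sequence.append((char.lower(), char.upper()))
--     return [''.join(comb) for comb in product(*lu_sequence)]
-- ===== SOURCE B (Python) =====
-- def case_permutations(word):
--     result = []
--
--     def go(i, prefix):
--         if i == len(word):
--             result.append(prefix)
--             return
--         char = word[i]
--         if char.isdigit():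
--             go(i + 1, prefix + char)
--         else:
--             go(i + 1, prefix + char.lower())
--             go(i + 1, prefix + char.upper())
--
--     go(0, '')
--     return result
-- ===== Notes on version B (the rewrite author's own statement) =====
-- stated objective: alternative
-- what changed: Replaces the itertools.product over a per-character options list with a direct recursive prefix enumeration (branch lower-then-upper at each non-digit character).
import Mathlib
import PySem

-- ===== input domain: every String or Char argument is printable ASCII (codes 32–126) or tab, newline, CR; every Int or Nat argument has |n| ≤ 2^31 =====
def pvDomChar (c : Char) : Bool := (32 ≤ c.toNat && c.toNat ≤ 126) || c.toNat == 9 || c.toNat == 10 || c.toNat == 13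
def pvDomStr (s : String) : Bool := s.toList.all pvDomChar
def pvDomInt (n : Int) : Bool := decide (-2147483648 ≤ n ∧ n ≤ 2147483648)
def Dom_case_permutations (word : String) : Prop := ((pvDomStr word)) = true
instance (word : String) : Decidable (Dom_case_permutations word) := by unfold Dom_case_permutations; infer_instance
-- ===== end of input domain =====

-- B replaces the itertools.product pipeline by a direct recursive prefix enumeration (alternative decomposition, same cost).

-- ===== PORT A =====
-- lu_sequence: per character, either the digit itself or the (lower, upper) pair;
-- then itertools.product (leftmost slowest) and ''.join of each combination.
def case_permutations (word : String) : List String :=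
  (((word.toList.foldl (fun acc c =>
      acc ++ [if PySem.Chars.isdigit c then [c]
              else [PySem.Chars.lowerChar c, PySem.Chars.upperChar c]]) []).foldl
    (fun acc opts => acc.flatMap (fun pre => opts.map (fun ch => pre ++ [ch]))) [[]]).map
    (fun l => String.ofList l))

-- ===== PORT B =====
-- go(i, prefix): structural recursion over the remaining characters, collecting finished prefixes.
def caseGo : List Char → String → List String
  | [], pre => [pre]
  | c :: rest, pre =>
    if PySem.Chars.isdigit c then caseGo rest (pre.push c)
    else caseGo rest (pre.push (PySem.Chars.lowerChar c)) ++
         caseGo rest (pre.push (PySem.Chars.upperChar c))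

def case_permutations_alt (word : String) : List String := caseGo word.toList ""

-- ===== PRECONDITION & SPEC =====
def Spec_case_permutations (word : String) (out : List String) : Prop := out = case_permutations_alt word
instance (word : String) (out : List String) : Decidable (Spec_case_permutations word out) := by unfold Spec_case_permutations; infer_instance

-- ===== CLAIM (what is proved, stated in full; the proofs are below) =====
def Claim_equal_case_permutations : Prop := ∀ (word : String), Dom_case_permutations word → Spec_case_permutations word (case_permutations word)

-- ===== LEMMAS AND PROOFS =====

def pvOpts (c : Char) : List Char :=
  if PySem.Chars.isdigit c then [c]
  else [PySem.Chars.lowerChar c, PySem.Chars.upperChar c]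

def pvProd : List Char → List (List Char)
  | [] => [[]]
  | c :: cs => (pvOpts c).flatMap (fun ch => (pvProd cs).map (fun l => ch :: l))

theorem pv_lu_eq (cs : List Char) (acc : List (List Char)) :
    cs.foldl (fun acc c =>
      acc ++ [if PySem.Chars.isdigit c then [c]
              else [PySem.Chars.lowerChar c, PySem.Chars.upperChar c]]) acc
      = acc ++ cs.map pvOpts := by
  induction cs generalizing acc with
  | nil => simp
  | cons c cs ih => simp [List.foldl_cons, ih, pvOpts]

theorem pv_foldl_flat (l : List (List Char)) (xs : List (List Char)) :
    l.foldl (fun acc opts => acc.flatMap (fun pre => opts.map (fun ch => pre ++ [ch]))) xs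
      = xs.flatMap (fun p =>
          l.foldl (fun acc opts => acc.flatMap (fun pre => opts.map (fun ch => pre ++ [ch]))) [p]) := by
  induction l generalizing xs with
  | nil => simp
  | cons o l ih =>
    simp only [List.foldl_cons]
    rw [ih, List.flatMap_assoc]
    congr 1
    funext p
    rw [← ih]
    simp

theorem pv_prod_eq (cs : List Char) (pre : List Char) :
    (cs.map pvOpts).foldl
      (fun acc opts => acc.flatMap (fun p => opts.map (fun ch => p ++ [ch]))) [pre]
      = (pvProd cs).map (fun l => pre ++ l) := by
  induction cs generalizing pre with
  | nil => simp [pvProd]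
  | cons c cs ih =>
    simp only [List.map_cons, List.foldl_cons, pvProd]
    rw [pv_foldl_flat]
    simp only [List.flatMap_singleton, List.flatMap_map, List.map_flatMap]
    congr 1
    funext ch
    rw [ih]
    simp

theorem pv_push_mk (pre : String) (c : Char) (l : List Char) :
    (pre.push c) ++ String.ofList l = pre ++ String.ofList (c :: l) := by
  apply String.ext
  simp

theorem pv_go_eq (cs : List Char) (pre : String) :
    caseGo cs pre = (pvProd cs).map (fun l => pre ++ String.ofList l) := by
  induction cs generalizing pre with
  | nil =>
    show [pre] = [pre ++ String.ofList []]
    simp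
  | cons c cs ih =>
    by_cases h : PySem.Chars.isdigit c = true
    · simp only [caseGo, h, if_pos, pvProd, pvOpts, List.flatMap_singleton, List.map_map]
      rw [ih]
      congr 1
      funext l
      exact pv_push_mk pre c l
    · simp only [caseGo, pvProd, pvOpts, if_neg h]
      rw [ih, ih]
      simp only [List.flatMap_cons, List.flatMap_nil, List.append_nil,
        List.map_append, List.map_map]
      congr 1 <;> · congr 1; funext l; exact pv_push_mk pre _ l

-- ===== VERDICT (by name: the statement is the Claim_ definition above) =====
theorem case_permutations_spec : Claim_equal_case_permutations := by
  intro word _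
  show case_permutations word = case_permutations_alt word
  unfold case_permutations case_permutations_alt
  rw [pv_lu_eq, List.nil_append, pv_prod_eq, pv_go_eq]
  simp
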